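-- pv_equiv track=rewrite | github.com/dashkim/ComputerVisualizationProject | tools/marching_cube_viewer.py | _triangles_from_row
-- ===== SOURCE A (Python) =====
-- def _triangles_from_row(row: tuple[int, ...]) -> list[tuple[int, int, int]]:
--     out: list[tuple[int, int, int]] = []
--     i = 0
--     while i + 2 < len(row):
--         e0, e1, e2 = row[i], row[i + 1], row[i + 2]
--         if e0 < 0 or e1 < 0 or e2 < 0:
--             break
--         out.append((e0, e1, e2))
--         i += 3
--     return out
-- ===== SOURCE B (Python) =====
-- def _triangles_from_row(row: tuple[int, ...]) -> list[tuple[int, int, int]]: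
--     it = iter(row)
--     triples = list(zip(it, it, it))
--     bad = next((j for j, t in enumerate(triples) if min(t) < 0), len(triples))
--     return triples[:bad]
-- ===== Notes on version B (the rewrite author's own statement) =====
-- stated objective: idiomatic
-- what changed: Replaces the manual index counter with break by the iterator-grouping idiom zip(it,it,it) to form all triples at once, then a next(...)-over-enumerate search for the first triple containing a negative and a slice up to it.
import Mathlib
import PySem

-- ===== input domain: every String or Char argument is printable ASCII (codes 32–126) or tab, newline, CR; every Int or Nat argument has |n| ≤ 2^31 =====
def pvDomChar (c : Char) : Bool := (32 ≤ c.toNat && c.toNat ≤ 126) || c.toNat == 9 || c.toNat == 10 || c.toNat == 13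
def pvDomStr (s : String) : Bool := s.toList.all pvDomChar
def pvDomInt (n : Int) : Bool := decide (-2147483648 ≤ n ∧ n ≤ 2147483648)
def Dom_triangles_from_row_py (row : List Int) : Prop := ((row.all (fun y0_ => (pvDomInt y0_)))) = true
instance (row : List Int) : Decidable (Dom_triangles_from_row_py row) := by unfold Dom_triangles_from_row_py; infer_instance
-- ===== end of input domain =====

-- B replaces A's index-counter-with-break loop by grouping the row into triples first
-- (iterator zip idiom), then cutting at the first triple containing a negative (idiomatic; same cost).

-- ===== PORT A =====
-- A's while loop: index i advances by 3, accumulator `out`. The loop runs at most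
-- row.length + 1 times, so a fuel counter of row.length + 1 makes the same computation total
-- (fuel is never exhausted before the loop's own exit); indexing is Python's row[i] via pyGetD,
-- exact here since the loop condition keeps i, i+1, i+2 in range.
def triRowA_loop (row : List Int) (fuel : Nat) (i : Nat) (out : List (Int × Int × Int)) :
    List (Int × Int × Int) :=
  match fuel with
  | 0 => out
  | fuel + 1 =>
    if i + 2 < row.length then
      let e0 := PySem.List.pyGetD row (i : Int) 0
      let e1 := PySem.List.pyGetD row ((i : Int) + 1) 0
      let e2 := PySem.List.pyGetD row ((i : Int) + 2) 0
      if e0 < 0 ∨ e1 < 0 ∨ e2 < 0 then out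
      else triRowA_loop row fuel (i + 3) (out ++ [(e0, e1, e2)])
    else out

def triangles_from_row_py (row : List Int) : List (Int × Int × Int) :=
  triRowA_loop row (row.length + 1) 0 []

-- ===== PORT B =====
-- list(zip(it, it, it)) on it = iter(row): consecutive triples, trailing incomplete group dropped.
def pvGroup3 : List Int → List (Int × Int × Int)
  | a :: b :: c :: r => (a, b, c) :: pvGroup3 r
  | _ => []

-- next((j for j, t in enumerate(triples) if min(t) < 0), len(triples)): the enumerate counter j
-- is the accumulator; reaching the end returns the count, i.e. len(triples).
def pvFirstBad : List (Int × Int × Int) → Nat → Nat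
  | [], j => j
  | t :: r, j => if min t.1 (min t.2.1 t.2.2) < 0 then j else pvFirstBad r (j + 1)

def triangles_from_row_py_alt (row : List Int) : List (Int × Int × Int) :=
  let triples := pvGroup3 row
  triples.take (pvFirstBad triples 0)

-- ===== PRECONDITION & SPEC =====
def Spec_triangles_from_row_py (row : List Int) (out : List (Int × Int × Int)) : Prop := out = triangles_from_row_py_alt row
instance (row : List Int) (out : List (Int × Int × Int)) : Decidable (Spec_triangles_from_row_py row out) := by unfold Spec_triangles_from_row_py; infer_instance

-- ===== CLAIM (what is proved, stated in full; the proofs are below) =====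
def Claim_equal_triangles_from_row_py : Prop := ∀ (row : List Int), Dom_triangles_from_row_py row → Spec_triangles_from_row_py row (triangles_from_row_py row)

-- ===== LEMMAS AND PROOFS =====

-- Reference form both ports reduce to: consume triples, stop at the first containing a negative.
def pvTri3 : List Int → List (Int × Int × Int)
  | a :: b :: c :: r => if a < 0 ∨ b < 0 ∨ c < 0 then [] else (a, b, c) :: pvTri3 r
  | _ => []

lemma pvFirstBad_shift (l : List (Int × Int × Int)) (j : Nat) :
    pvFirstBad l j = j + pvFirstBad l 0 := by
  induction l generalizing j with
  | nil => simp [pvFirstBad]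
  | cons t r ih =>
    simp only [pvFirstBad]
    split
    · simp
    · rw [ih (j + 1), ih 1]; omega

lemma alt_eq_tri3 (row : List Int) : triangles_from_row_py_alt row = pvTri3 row := by
  induction row using pvTri3.induct with
  | case1 a b c r hbad =>
    have hm : min a (min b c) < 0 := by
      rw [min_lt_iff, min_lt_iff]; exact hbad
    simp [triangles_from_row_py_alt, pvGroup3, pvTri3, pvFirstBad, hm, hbad]
  | case2 a b c r hbad ih =>
    have hm : ¬ min a (min b c) < 0 := by
      rw [min_lt_iff, min_lt_iff]; exact hbad
    simp only [triangles_from_row_py_alt] at ih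
    simp only [triangles_from_row_py_alt, pvGroup3, pvFirstBad, hm, if_false,
      pvFirstBad_shift (pvGroup3 r) 1]
    rw [Nat.add_comm, List.take_succ_cons, ih, pvTri3, if_neg hbad]
  | case3 t ht =>
    match t, ht with
    | [], _ => rfl
    | [a], _ => rfl
    | [a, b], _ => rfl
    | a :: b :: c :: r, ht => exact absurd rfl (ht a b c r)

lemma loopA_eq (row : List Int) (fuel i : Nat) (out : List (Int × Int × Int))
    (hf : row.length ≤ i + 3 * fuel + 2) :
    triRowA_loop row fuel i out = out ++ pvTri3 (row.drop i) := by
  induction fuel generalizing i out with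
  | zero =>
    have hnil : pvTri3 (row.drop i) = [] := by
      have hlen : (row.drop i).length ≤ 2 := by simp; omega
      match hr : row.drop i, hlen with
      | [], _ => rfl
      | [a], _ => rfl
      | [a, b], _ => rfl
    simp [triRowA_loop, hnil]
  | succ fuel ih =>
    rw [triRowA_loop]
    by_cases h : i + 2 < row.length
    · have e0 : PySem.List.pyGetD row (i : Int) 0 = row[i]'(by omega) := by
        rw [PySem.List.pyGetD_natCast, List.getD_eq_getElem _ _ (by omega)]
      have e1 : PySem.List.pyGetD row ((i : Int) + 1) 0 = row[i + 1]'(by omega) := by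
        rw [show ((i : Int) + 1) = ((i + 1 : Nat) : Int) by push_cast; ring,
            PySem.List.pyGetD_natCast, List.getD_eq_getElem _ _ (by omega)]
      have e2 : PySem.List.pyGetD row ((i : Int) + 2) 0 = row[i + 2]'(by omega) := by
        rw [show ((i : Int) + 2) = ((i + 2 : Nat) : Int) by push_cast; ring,
            PySem.List.pyGetD_natCast, List.getD_eq_getElem _ _ (by omega)]
      have hd : row.drop i = row[i]'(by omega) :: row[i+1]'(by omega) :: row[i+2]'(by omega)
          :: row.drop (i + 3) := by
        rw [List.drop_eq_getElem_cons (by omega), List.drop_eq_getElem_cons (by omega),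
            List.drop_eq_getElem_cons (by omega)]
      rw [if_pos h, hd, pvTri3]
      simp only [e0, e1, e2]
      by_cases hbad : row[i]'(by omega) < 0 ∨ row[i+1]'(by omega) < 0 ∨ row[i+2]'(by omega) < 0
      · rw [if_pos hbad, if_pos hbad]; simp
      · rw [if_neg hbad, if_neg hbad, ih (i + 3) _ (by omega)]; simp
    · have hnil : pvTri3 (row.drop i) = [] := by
        have hlen : (row.drop i).length ≤ 2 := by simp; omega
        match hr : row.drop i, hlen with
        | [], _ => rfl
        | [a], _ => rfl
        | [a, b], _ => rfl
      simp [h, hnil]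

-- ===== VERDICT (by name: the statement is the Claim_ definition above) =====
theorem triangles_from_row_py_spec : Claim_equal_triangles_from_row_py := by
  intro row _
  unfold Spec_triangles_from_row_py triangles_from_row_py
  rw [loopA_eq row (row.length + 1) 0 [] (by omega), alt_eq_tri3]
  simp
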